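-- pv_equiv track=rewrite | github.com/luochenghuajin/doudizhu | dealer.py | EvaluateHandHeuristic
-- ===== SOURCE A (Python) =====
-- def EvaluateHandHeuristic(hand_str: str) -> int:
--     # Count high ranks and jokers and pairs/triples
--     score = 0
--     frequency = {}
--     for ch in hand_str:
--         if ch in frequency:
--             frequency[ch] = frequency[ch] + 1
--         else:
--             frequency[ch] = 1
--
--     # Award points for powerful ranks
--     for rank_char, count in frequency.items():
--         # Jokers are strongest
--         if rank_char == "R":
--             score = score + 50 * count
--         elif rank_char == "B":
--             score = score + 45 * count
--         elif rank_char == "2":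
--             score = score + 20 * count
--         elif rank_char == "A":
--             score = score + 12 * count
--         elif rank_char == "K":
--             score = score + 8 * count
--         elif rank_char == "Q":
--             score = score + 6 * count
--         elif rank_char == "J":
--             score = score + 5 * count
--         elif rank_char == "T":
--             score = score + 4 * count
--         else:
--             score = score + 1 * count
--
--         # Award combos
--         if count == 2:
--             score = score + 10   # pair
--         elif count == 3:
--             score = score + 25   # triple
--         elif count == 4:
--             score = score + 40   # bomb
--
--     return score
-- ===== SOURCE B (Python) =====
-- RANK_WEIGHT = {"R": 50, "B": 45, "2": 20, "A": 12, "K": 8, "Q": 6, "J": 5, "T": 4}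
-- COMBO_BONUS = {2: 10, 3: 25, 4: 40}
--
--
-- def EvaluateHandHeuristic(hand_str: str) -> int:
--     # No frequency map: recursively peel off one distinct rank at a time.
--     # Score the first character's whole group (count + strip), recurse on the rest.
--     if not hand_str:
--         return 0
--     ch = hand_str[0]
--     cnt = hand_str.count(ch)
--     rest = hand_str.replace(ch, "")
--     return RANK_WEIGHT.get(ch, 1) * cnt + COMBO_BONUS.get(cnt, 0) + EvaluateHandHeuristic(rest)
-- ===== Notes on version B (the rewrite author's own statement) =====
-- stated objective: alternative
-- what changed: B builds no frequency dictionary at all: it recursively peels off one distinct rank per step (count the first character's occurrences with str.count, strip them all with str.replace, score that group's weight*count plus combo bonus, recurse on the remainder), replacing A's count-then-iterate-the-map two-phase loop with structural recursion on the shrinking string.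
import Mathlib
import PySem

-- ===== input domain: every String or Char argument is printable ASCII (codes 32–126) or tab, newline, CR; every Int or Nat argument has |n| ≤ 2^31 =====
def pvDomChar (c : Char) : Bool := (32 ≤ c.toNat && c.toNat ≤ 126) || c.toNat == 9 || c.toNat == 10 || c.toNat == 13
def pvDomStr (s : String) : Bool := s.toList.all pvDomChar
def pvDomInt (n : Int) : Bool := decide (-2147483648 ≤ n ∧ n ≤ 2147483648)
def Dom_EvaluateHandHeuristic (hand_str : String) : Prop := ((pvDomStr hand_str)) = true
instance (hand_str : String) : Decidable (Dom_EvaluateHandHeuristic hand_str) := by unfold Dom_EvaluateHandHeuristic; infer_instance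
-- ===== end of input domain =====

-- B replaces A's frequency-dictionary two-phase loop by structural recursion that peels off one
-- distinct rank per step (count + strip + recurse); objective: alternative algorithm, same results.

-- ===== PORT A =====
def EvaluateHandHeuristic (hand_str : String) : Int :=
  let frequency := hand_str.toList.foldl (fun d ch =>
    if d.contains ch then d.insert ch (d.getD ch 0 + 1) else d.insert ch 1)
    PySem.Dict.empty
  frequency.items.foldl (fun score p =>
    let score :=
      if p.1 = 'R' then score + 50 * p.2
      else if p.1 = 'B' then score + 45 * p.2
      else if p.1 = '2' then score + 20 * p.2
      else if p.1 = 'A' then score + 12 * p.2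
      else if p.1 = 'K' then score + 8 * p.2
      else if p.1 = 'Q' then score + 6 * p.2
      else if p.1 = 'J' then score + 5 * p.2
      else if p.1 = 'T' then score + 4 * p.2
      else score + 1 * p.2
    if p.2 = 2 then score + 10
    else if p.2 = 3 then score + 25
    else if p.2 = 4 then score + 40
    else score) 0

-- ===== PORT B =====
def pvRankWeight : PySem.Dict Char Int :=
  PySem.Dict.ofList [('R', 50), ('B', 45), ('2', 20), ('A', 12), ('K', 8), ('Q', 6), ('J', 5), ('T', 4)]

def pvComboBonus : PySem.Dict Int Int :=
  PySem.Dict.ofList [(2, 10), (3, 25), (4, 40)]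

-- recursive helper on the character list: count the first char (str.count on a single char is the
-- character count — exact here), strip all its copies (str.replace(ch, '') = filter), recurse
def pvAltGo : List Char → Int
  | [] => 0
  | c :: t =>
    let cnt : Int := ((c :: t).count c : Nat)
    let rest := (c :: t).filter (fun x => !(x == c))
    pvRankWeight.getD c 1 * cnt + pvComboBonus.getD cnt 0 + pvAltGo rest
termination_by l => l.length
decreasing_by
  simp only [List.filter_cons, beq_self_eq_true, Bool.not_true, List.length_cons]
  exact Nat.lt_succ_of_le (List.length_filter_le _ _)

def EvaluateHandHeuristic_alt (hand_str : String) : Int := pvAltGo hand_str.toList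

-- ===== PRECONDITION & SPEC =====
def Spec_EvaluateHandHeuristic (hand_str : String) (out : Int) : Prop := out = EvaluateHandHeuristic_alt hand_str
instance (hand_str : String) (out : Int) : Decidable (Spec_EvaluateHandHeuristic hand_str out) := by unfold Spec_EvaluateHandHeuristic; infer_instance

-- ===== CLAIM (what is proved, stated in full; the proofs are below) =====
def Claim_equal_EvaluateHandHeuristic : Prop := ∀ (hand_str : String), Dom_EvaluateHandHeuristic hand_str → Spec_EvaluateHandHeuristic hand_str (EvaluateHandHeuristic hand_str)

-- ===== LEMMAS AND PROOFS =====

-- A's rank-branch chain as a function (proof abbreviation only)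
def pvWA (k : Char) : Int :=
  if k = 'R' then 50 else if k = 'B' then 45 else if k = '2' then 20
  else if k = 'A' then 12 else if k = 'K' then 8 else if k = 'Q' then 6
  else if k = 'J' then 5 else if k = 'T' then 4 else 1

-- A's combo-branch chain as a function (proof abbreviation only)
def pvBA (v : Int) : Int :=
  if v = 2 then 10 else if v = 3 then 25 else if v = 4 then 40 else 0

-- the per-rank contribution, parameterised by the multiset the counts are taken in
def pvF (l : List Char) (k : Char) : Int :=
  pvWA k * ((l.count k : Nat) : Int) + pvBA ((l.count k : Nat) : Int)

set_option maxHeartbeats 1000000 in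
theorem pvRankWeight_eq (ch : Char) : pvRankWeight.getD ch 1 = pvWA ch := by
  have h : pvRankWeight =
      ((((((((PySem.Dict.empty.insert 'R' 50).insert 'B' 45).insert '2' 20).insert 'A' 12).insert
        'K' 8).insert 'Q' 6).insert 'J' 5).insert 'T' 4) := rfl
  rw [h]
  simp only [PySem.Dict.getD_insert, PySem.Dict.getD_empty, pvWA]
  split_ifs <;> simp_all

set_option maxHeartbeats 1000000 in
theorem pvComboBonus_eq (v : Int) : pvComboBonus.getD v 0 = pvBA v := by
  have h : pvComboBonus =
      (((PySem.Dict.empty.insert 2 10).insert 3 25).insert 4 40) := rfl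
  rw [h]
  simp only [PySem.Dict.getD_insert, PySem.Dict.getD_empty, pvBA]
  split_ifs <;> simp_all

-- A's frequency loop builds exactly Counter(hand_str)
theorem pvFreq_eq_counter (l : List Char) :
    l.foldl (fun d ch => if d.contains ch then d.insert ch (d.getD ch 0 + 1) else d.insert ch 1)
      PySem.Dict.empty = PySem.Dict.counter l := by
  rw [← PySem.Dict.foldl_insert_getD_add_one_eq_counter]
  apply PySem.List.foldl_congr_mem
  intro d ch _
  by_cases h : d.contains ch
  · simp [h]
  · have hc : d.contains ch = false := by simpa using h
    rw [if_neg (by simp [h]), PySem.Dict.getD_of_not_contains d 0 hc]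
    norm_num

-- the combo-bonus branch chain of A, as an additive term
theorem pvOuter (v s : Int) :
    (if v = 2 then s + 10 else if v = 3 then s + 25 else if v = 4 then s + 40 else s)
      = s + pvBA v := by
  unfold pvBA
  split_ifs <;> ring

-- the rank-weight branch chain of A, as an additive term
theorem pvInner (acc v : Int) (k : Char) :
    (if k = 'R' then acc + 50 * v
      else if k = 'B' then acc + 45 * v
      else if k = '2' then acc + 20 * v
      else if k = 'A' then acc + 12 * v
      else if k = 'K' then acc + 8 * v
      else if k = 'Q' then acc + 6 * v
      else if k = 'J' then acc + 5 * v
      else if k = 'T' then acc + 4 * v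
      else acc + 1 * v)
      = acc + pvWA k * v := by
  unfold pvWA
  split_ifs <;> ring

set_option maxHeartbeats 1000000 in
-- A's scoring fold over the counter, written as one sum over the distinct characters
theorem pvA_sum (l : List Char) :
    (PySem.Dict.counter l).items.foldl (fun score p =>
      let score :=
        if p.1 = 'R' then score + 50 * p.2
        else if p.1 = 'B' then score + 45 * p.2
        else if p.1 = '2' then score + 20 * p.2
        else if p.1 = 'A' then score + 12 * p.2
        else if p.1 = 'K' then score + 8 * p.2
        else if p.1 = 'Q' then score + 6 * p.2
        else if p.1 = 'J' then score + 5 * p.2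
        else if p.1 = 'T' then score + 4 * p.2
        else score + 1 * p.2
      if p.2 = 2 then score + 10
      else if p.2 = 3 then score + 25
      else if p.2 = 4 then score + 40
      else score) 0
    = ((PySem.Set.ofList l).map (pvF l)).sum := by
  have hstep := PySem.List.foldl_congr_mem (PySem.Dict.counter l).items (fun score p =>
      let score :=
        if p.1 = 'R' then score + 50 * p.2
        else if p.1 = 'B' then score + 45 * p.2
        else if p.1 = '2' then score + 20 * p.2
        else if p.1 = 'A' then score + 12 * p.2
        else if p.1 = 'K' then score + 8 * p.2
        else if p.1 = 'Q' then score + 6 * p.2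
        else if p.1 = 'J' then score + 5 * p.2
        else if p.1 = 'T' then score + 4 * p.2
        else score + 1 * p.2
      if p.2 = 2 then score + 10
      else if p.2 = 3 then score + 25
      else if p.2 = 4 then score + 40
      else score)
    (fun score p => score + (pvWA p.1 * p.2 + pvBA p.2)) 0
    (by
      intro acc p _
      obtain ⟨k, v⟩ := p
      show (if v = 2 then _ + 10 else if v = 3 then _ + 25 else if v = 4 then _ + 40 else _) = _
      rw [pvOuter, pvInner]
      ring)
  rw [hstep, PySem.List.foldl_add, zero_add, PySem.Dict.items_counter, List.map_map]
  rfl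

-- Set.discard is a filter (definitional)
theorem pvDiscard_eq (s : PySem.Set Char) (x : Char) :
    PySem.Set.discard s x = s.filter (fun y => !(y == x)) := rfl

-- two filters commute
theorem pvFilter_swap (p q : Char → Bool) (l : List Char) :
    (l.filter q).filter p = (l.filter p).filter q := by
  rw [List.filter_filter, List.filter_filter]
  exact List.filter_congr fun a _ => Bool.and_comm _ _

-- ofList commutes with filter (first-occurrence dedup of a filtered list)
theorem pvFilter_ofList (p : Char → Bool) (t : List Char) :
    (PySem.Set.ofList t).filter p = PySem.Set.ofList (t.filter p) := by
  induction t with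
  | nil => rfl
  | cons x t ih =>
    rw [PySem.Set.ofList_cons]
    by_cases hp : p x = true
    · rw [List.filter_cons_of_pos hp, List.filter_cons_of_pos hp, PySem.Set.ofList_cons]
      rw [pvDiscard_eq, pvDiscard_eq, pvFilter_swap, ih]
    · have hp' : p x = false := by simpa using hp
      rw [List.filter_cons_of_neg (by simp [hp']), List.filter_cons_of_neg (by simp [hp']), ← ih,
        pvDiscard_eq, pvFilter_swap]
      apply List.filter_eq_self.mpr
      intro a ha
      have hap : p a = true := List.of_mem_filter ha
      have hax : a ≠ x := by rintro rfl; rw [hap] at hp'; cases hp'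
      simpa using hax

-- first-occurrence dedup of c :: t starts with c, then the dedup of t with all c's stripped
theorem pvOfList_cons_filter (c : Char) (t : List Char) :
    PySem.Set.ofList (c :: t) = c :: PySem.Set.ofList (t.filter (fun y => !(y == c))) := by
  rw [PySem.Set.ofList_cons, pvDiscard_eq, pvFilter_ofList]

-- counts of a non-stripped character survive the strip
theorem pvCount_filter (c k : Char) (t : List Char) (h : k ≠ c) :
    (t.filter (fun y => !(y == c))).count k = t.count k := by
  rw [List.count_filter]
  simp [h]

-- B's recursion computes the same per-distinct-character sum
theorem pvAlt_sum : ∀ (n : Nat) (l : List Char), l.length ≤ n →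
    pvAltGo l = ((PySem.Set.ofList l).map (pvF l)).sum := by
  intro n
  induction n with
  | zero =>
    intro l hl
    have : l = [] := List.eq_nil_of_length_eq_zero (Nat.le_zero.mp hl)
    subst this
    simp [pvAltGo]
  | succ n ih =>
    intro l hl
    match l with
    | [] => simp [pvAltGo]
    | c :: t =>
      rw [pvAltGo, pvOfList_cons_filter, List.map_cons, List.sum_cons]
      have hrest : (c :: t).filter (fun x => !(x == c)) = t.filter (fun x => !(x == c)) := by
        simp
      have hlen : (t.filter (fun x => !(x == c))).length ≤ n :=
        le_trans (List.length_filter_le _ _) (Nat.le_of_succ_le_succ hl)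
      rw [hrest, ih _ hlen, pvRankWeight_eq, pvComboBonus_eq]
      have htail : (PySem.Set.ofList (t.filter (fun y => !(y == c)))).map (pvF (c :: t))
          = (PySem.Set.ofList (t.filter (fun y => !(y == c)))).map (pvF (t.filter (fun y => !(y == c)))) := by
        apply List.map_congr_left
        intro k hk
        have hk' : k ∈ t.filter (fun y => !(y == c)) := by simpa [PySem.Set.mem_ofList] using hk
        have hkc : k ≠ c := by
          have := (List.mem_filter.mp hk').2
          simpa using this
        unfold pvF
        rw [pvCount_filter c k t hkc, List.count_cons_of_ne hkc.symm]
      rw [htail]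
      show pvWA c * ((c :: t).count c : Int) + pvBA ((c :: t).count c : Int) + _ = pvF (c :: t) c + _
      unfold pvF
      ring

-- ===== VERDICT (by name: the statement is the Claim_ definition above) =====
theorem EvaluateHandHeuristic_spec : Claim_equal_EvaluateHandHeuristic := by
  intro s _
  unfold Spec_EvaluateHandHeuristic EvaluateHandHeuristic EvaluateHandHeuristic_alt
  dsimp only
  rw [pvFreq_eq_counter, pvA_sum, pvAlt_sum s.toList.length s.toList (le_refl _)]
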